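-- pv_equiv track=rewrite | github.com/commaai/openpilot | opendbc_repo/opendbc/car/tests/car_diff.py | group_frames
-- ===== SOURCE A (Python) =====
-- from typing import Any
--
-- Diff = tuple[str, int, tuple[Any, Any], int]
--
-- def group_frames(diffs: list[Diff], max_gap: int = 15) -> list[list[Diff]]:
--   groups = []
--   current = [diffs[0]]
--   for diff in diffs[1:]:
--     _, frame, _, _ = diff
--     _, prev_frame, _, _ = current[-1]
--     if frame <= prev_frame + max_gap:
--       current.append(diff)
--     else:
--       groups.append(current)
--       current = [diff]
--   groups.append(current)
--   return groups
-- ===== SOURCE B (Python) =====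
-- Diff = tuple  # same shape as A's Diff alias
--
-- def group_frames(diffs, max_gap=15):
--   # Back-to-front build: walk the diffs in reverse, growing the newest group
--   # (kept reversed) and fixing the orientation once at the end.
--   rev = []  # groups in reverse order; each group's elements in reverse order
--   for d in reversed(diffs):
--     if rev and rev[-1][-1][1] <= d[1] + max_gap:
--       rev[-1].append(d)
--     else:
--       rev.append([d])
--   return [g[::-1] for g in reversed(rev)]
-- ===== Notes on version B (the rewrite author's own statement) =====
-- stated objective: alternative
-- what changed: B builds the grouping back-to-front: it walks the diffs in reverse, growing the newest group in reversed accumulators and fixing orientation once at the end, instead of A's forward flush-on-break accumulator loop.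
import Mathlib
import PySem

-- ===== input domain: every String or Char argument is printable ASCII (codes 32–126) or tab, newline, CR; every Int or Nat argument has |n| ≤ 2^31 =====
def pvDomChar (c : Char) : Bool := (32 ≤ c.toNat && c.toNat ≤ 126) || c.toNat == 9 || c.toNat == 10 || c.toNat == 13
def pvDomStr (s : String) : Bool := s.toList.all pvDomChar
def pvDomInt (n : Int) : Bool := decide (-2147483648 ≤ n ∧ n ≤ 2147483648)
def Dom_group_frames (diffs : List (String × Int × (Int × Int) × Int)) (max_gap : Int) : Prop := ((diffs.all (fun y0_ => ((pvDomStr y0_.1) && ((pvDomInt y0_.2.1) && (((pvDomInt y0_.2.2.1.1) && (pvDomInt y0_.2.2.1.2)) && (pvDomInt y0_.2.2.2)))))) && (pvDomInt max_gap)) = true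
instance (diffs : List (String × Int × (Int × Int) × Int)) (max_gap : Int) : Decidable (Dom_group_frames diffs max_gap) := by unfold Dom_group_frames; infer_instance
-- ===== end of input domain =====

-- B walks the diffs back-to-front, growing the newest group at the front, instead of A's
-- forward flush-on-break accumulator loop; same O(n) cost, objective: alternative.

-- ===== PORT A =====
-- A's `current` list is appended at the tail and read at current[-1]; the port keeps
-- `current` reversed (head = last appended element) and reverses it when flushed.
def group_frames (diffs : List (String × Int × (Int × Int) × Int)) (max_gap : Int) : List (List (String × Int × (Int × Int) × Int)) :=
  match diffs with
  | [] => []  -- Python raises IndexError on diffs[0]; excluded by Pre_group_frames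
  | d0 :: rest =>
    let st := rest.foldl
      (fun (st : List (List (String × Int × (Int × Int) × Int)) × List (String × Int × (Int × Int) × Int)) diff =>
        let prev := st.2.headD d0   -- current[-1]; current is never empty
        if diff.2.1 ≤ prev.2.1 + max_gap then (st.1, diff :: st.2)
        else (st.1 ++ [st.2.reverse], [diff]))
      ([], [d0])
    st.1 ++ [st.2.reverse]

-- ===== PORT B =====
-- Source B appends groups / elements at the tail and reverses everything at the end;
-- the port conses at the head, so the two final reversals cancel and the state is
-- already in final orientation (newest group at the head, its elements newest-first).
def group_frames_alt (diffs : List (String × Int × (Int × Int) × Int)) (max_gap : Int) : List (List (String × Int × (Int × Int) × Int)) :=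
  diffs.reverse.foldl
    (fun (grs : List (List (String × Int × (Int × Int) × Int))) d =>
      match grs with
      | (s :: g) :: gs =>
        if s.2.1 ≤ d.2.1 + max_gap then (d :: s :: g) :: gs else [d] :: (s :: g) :: gs
      | _ => [d] :: grs)
    []

-- ===== PRECONDITION & SPEC =====
-- Pre_ excludes only the empty list, on which Python A raises IndexError at diffs[0]
-- (B happens to return [] there).
def Pre_group_frames (diffs : List (String × Int × (Int × Int) × Int)) (_max_gap : Int) : Prop := diffs ≠ []
instance (diffs : List (String × Int × (Int × Int) × Int)) (max_gap : Int) : Decidable (Pre_group_frames diffs max_gap) := by unfold Pre_group_frames; infer_instance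
def pvWitness_group_frames : (List (String × Int × (Int × Int) × Int)) × Int := ([("a", 1, (0, 0), 2), ("b", 30, (1, 1), 3)], 15)

def Spec_group_frames (diffs : List (String × Int × (Int × Int) × Int)) (max_gap : Int) (out : List (List (String × Int × (Int × Int) × Int))) : Prop := out = group_frames_alt diffs max_gap
instance (diffs : List (String × Int × (Int × Int) × Int)) (max_gap : Int) (out : List (List (String × Int × (Int × Int) × Int))) : Decidable (Spec_group_frames diffs max_gap out) := by unfold Spec_group_frames; infer_instance

-- ===== CLAIM (what is proved, stated in full; the proofs are below) =====
def Claim_equal_group_frames : Prop := ∀ (diffs : List (String × Int × (Int × Int) × Int)) (max_gap : Int), Dom_group_frames diffs max_gap → Pre_group_frames diffs max_gap → Spec_group_frames diffs max_gap (group_frames diffs max_gap)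

-- ===== LEMMAS AND PROOFS =====

-- Reference grouping: `runG mg c rest = (tail of c's group, the later groups)`.
def runG (mg : Int) : (String × Int × (Int × Int) × Int) → List (String × Int × (Int × Int) × Int) → List (String × Int × (Int × Int) × Int) × List (List (String × Int × (Int × Int) × Int))
  | _, [] => ([], [])
  | c, e :: rs =>
    let p := runG mg e rs
    if e.2.1 ≤ c.2.1 + mg then (e :: p.1, p.2) else ([], (e :: p.1) :: p.2)

theorem groupA_run (mg : Int) (d0 : String × Int × (Int × Int) × Int) :
    ∀ (rest : List (String × Int × (Int × Int) × Int)) (c : String × Int × (Int × Int) × Int)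
      (cs : List (String × Int × (Int × Int) × Int)) (groups : List (List (String × Int × (Int × Int) × Int))),
    (let st := rest.foldl
      (fun (st : List (List (String × Int × (Int × Int) × Int)) × List (String × Int × (Int × Int) × Int)) diff =>
        let prev := st.2.headD d0
        if diff.2.1 ≤ prev.2.1 + mg then (st.1, diff :: st.2)
        else (st.1 ++ [st.2.reverse], [diff]))
      (groups, c :: cs)
     st.1 ++ [st.2.reverse]) =
      groups ++ (((c :: cs).reverse ++ (runG mg c rest).1) :: (runG mg c rest).2) := by
  intro rest
  induction rest with
  | nil => intro c cs groups; simp [runG]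
  | cons e rs ih =>
    intro c cs groups
    simp only [List.foldl_cons, List.headD_cons, runG]
    by_cases h : e.2.1 ≤ c.2.1 + mg
    · simp only [if_pos h]
      rw [ih e (c :: cs) groups]
      simp
    · simp only [if_neg h]
      rw [ih e [] (groups ++ [(c :: cs).reverse])]
      simp

theorem groupB_run (mg : Int) :
    ∀ (rest : List (String × Int × (Int × Int) × Int)) (d : String × Int × (Int × Int) × Int),
    (d :: rest).foldr
      (fun d (grs : List (List (String × Int × (Int × Int) × Int))) =>
        match grs with
        | (s :: g) :: gs =>
          if s.2.1 ≤ d.2.1 + mg then (d :: s :: g) :: gs else [d] :: (s :: g) :: gs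
        | _ => [d] :: grs)
      [] = (d :: (runG mg d rest).1) :: (runG mg d rest).2 := by
  intro rest
  induction rest with
  | nil => intro d; simp [runG]
  | cons e rs ih =>
    intro d
    simp only [List.foldr_cons] at *
    rw [ih e]
    simp only [runG]
    by_cases h : e.2.1 ≤ d.2.1 + mg
    · simp [if_pos h]
    · simp [if_neg h]

-- ===== VERDICT (by name: the statement is the Claim_ definition above) =====
theorem group_frames_spec : Claim_equal_group_frames := by
  intro diffs max_gap _dom hpre
  unfold Spec_group_frames group_frames group_frames_alt
  match diffs with
  | [] => exact absurd rfl hpre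
  | d0 :: rest =>
    rw [List.foldl_reverse]
    have hB := groupB_run max_gap rest d0
    simp only [List.foldr_cons] at hB ⊢
    rw [hB]
    have hA := groupA_run max_gap d0 rest d0 [] []
    rw [hA]
    simp
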